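-- pv_equiv track=rewrite | github.com/Neko88/Encrypt-Decrypt | transposition.py | four_winds_en
-- ===== SOURCE A (Python) =====
-- def four_winds_en(plaintext, key):
--   plaintext = plaintext.replace(" ","")
--   split_1 = ""
--   split_2 = ""
--   split_3 = ""
--   cycle = 0
--
--   for i in range(len(plaintext)):
--     if i + 1 - cycle*4 == 1:
--       split_1 += plaintext[i]
--
--     elif i + 1 - cycle*4 == 2:
--       if key == "Clockwise":
--         split_2 += plaintext[i]
--       else:
--         split_3 += plaintext[i]
--
--     elif i + 1 - cycle*4 == 3:
--       split_1 += plaintext[i]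
--
--     else:
--       if key == "Clockwise":
--         split_3 += plaintext[i]
--       else:
--         split_2 += plaintext[i]
--       cycle += 1
--
--   return split_2 + split_1 + split_3
-- ===== SOURCE B (Python) =====
-- def four_winds_en(plaintext, key):
--     s = plaintext.replace(" ", "")
--     split_1 = s[0::2]
--     if key == "Clockwise":
--         split_2, split_3 = s[1::4], s[3::4]
--     else:
--         split_2, split_3 = s[3::4], s[1::4]
--     return split_2 + split_1 + split_3
-- ===== Notes on version B (the rewrite author's own statement) =====
-- stated objective: idiomatic
-- what changed: Replaced the per-character loop with its running cycle counter and four-way branch chain by three stride slices (s[0::2], s[1::4], s[3::4]) selected by the key, a closed-form reading of the index-residue pattern.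
import Mathlib
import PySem

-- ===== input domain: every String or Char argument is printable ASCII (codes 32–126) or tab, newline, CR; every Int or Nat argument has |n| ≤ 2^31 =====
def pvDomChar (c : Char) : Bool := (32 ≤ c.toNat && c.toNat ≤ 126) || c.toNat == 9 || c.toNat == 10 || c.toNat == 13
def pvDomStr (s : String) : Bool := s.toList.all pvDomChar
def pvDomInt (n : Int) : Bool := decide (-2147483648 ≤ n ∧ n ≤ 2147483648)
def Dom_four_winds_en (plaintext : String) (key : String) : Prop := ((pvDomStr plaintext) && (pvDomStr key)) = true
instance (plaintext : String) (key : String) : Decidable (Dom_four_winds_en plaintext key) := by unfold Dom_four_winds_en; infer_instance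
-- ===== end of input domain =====

-- B replaces A's per-character loop with its cycle counter and branch chain by three
-- stride slices selected by the key (objective: idiomatic; same O(n) cost).

-- ===== PORT A =====
-- A's for-loop over range(len(plaintext)) as the obvious structural recursion over the
-- characters, carrying the same state (i, cycle, split_1, split_2, split_3);
-- strings are handled as PySem.Chars lists of code points.
def goA_four_winds (key : String) : List Char → Int → Int → List Char → List Char → List Char → List Char
  | [], _, _, s1, s2, s3 => s2 ++ s1 ++ s3
  | c :: rest, i, cycle, s1, s2, s3 =>
    if i + 1 - cycle * 4 = 1 then
      goA_four_winds key rest (i + 1) cycle (s1 ++ [c]) s2 s3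
    else if i + 1 - cycle * 4 = 2 then
      if key = "Clockwise" then goA_four_winds key rest (i + 1) cycle s1 (s2 ++ [c]) s3
      else goA_four_winds key rest (i + 1) cycle s1 s2 (s3 ++ [c])
    else if i + 1 - cycle * 4 = 3 then
      goA_four_winds key rest (i + 1) cycle (s1 ++ [c]) s2 s3
    else
      if key = "Clockwise" then goA_four_winds key rest (i + 1) (cycle + 1) s1 s2 (s3 ++ [c])
      else goA_four_winds key rest (i + 1) (cycle + 1) s1 (s2 ++ [c]) s3

def four_winds_en (plaintext : String) (key : String) : String :=
  String.ofList (goA_four_winds key (PySem.Str.replace plaintext " " "").toList 0 0 [] [] [])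

-- ===== PORT B =====
-- Source B: s = plaintext.replace(" ",""); split_1 = s[0::2]; the two 4-strides chosen by key.
def four_winds_en_alt (plaintext : String) (key : String) : String :=
  let s := (PySem.Str.replace plaintext " " "").toList
  let split1 := (PySem.Chars.slice? s (some 0) none 2).getD []
  let every1 := (PySem.Chars.slice? s (some 1) none 4).getD []
  let every3 := (PySem.Chars.slice? s (some 3) none 4).getD []
  if key = "Clockwise" then String.ofList (every1 ++ split1 ++ every3)
  else String.ofList (every3 ++ split1 ++ every1)

-- ===== PRECONDITION & SPEC =====
def Spec_four_winds_en (plaintext : String) (key : String) (out : String) : Prop := out = four_winds_en_alt plaintext key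
instance (plaintext : String) (key : String) (out : String) : Decidable (Spec_four_winds_en plaintext key out) := by unfold Spec_four_winds_en; infer_instance

-- ===== CLAIM (what is proved, stated in full; the proofs are below) =====
def Claim_equal_four_winds_en : Prop := ∀ (plaintext : String) (key : String), Dom_four_winds_en plaintext key → Spec_four_winds_en plaintext key (four_winds_en plaintext key)

-- ===== LEMMAS AND PROOFS =====

-- every st-th element of a list, starting at its head
def everyNth {α : Type} (st : Nat) : List α → List α
  | [] => []
  | a :: t => a :: everyNth st (t.drop (st - 1))
  termination_by l => l.length
  decreasing_by simp

theorem everyNth_nil {α : Type} (st : Nat) : everyNth st ([] : List α) = [] := by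
  simp [everyNth]

theorem everyNth_cons {α : Type} (st : Nat) (a : α) (t : List α) :
    everyNth st (a :: t) = a :: everyNth st (t.drop (st - 1)) := by
  simp [everyNth]

theorem everyNth_div_step (st L : Nat) (hst : 0 < st) (hL : 1 ≤ L) :
    (L + st - 1) / st = ((L - st) + st - 1) / st + 1 := by
  by_cases h : st ≤ L
  · have heq : L + st - 1 = ((L - st) + st - 1) + st := by omega
    rw [heq, Nat.add_div_right _ hst]
  · have h0 : L - st = 0 := by omega
    have h1 : (0 + st - 1) / st = 0 := Nat.div_eq_of_lt (by omega)
    have h2 : (L + st - 1) / st = 1 :=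
      Nat.div_eq_of_lt_le (by omega) (by omega)
    rw [h0, h1, h2]

theorem filterMap_range_everyNth {α : Type} (st : Nat) (hst : 0 < st) :
    ∀ (c : Nat) (d : List α), c = (d.length + st - 1) / st →
      (List.range c).filterMap (fun k => d[st * k]?) = everyNth st d := by
  intro c
  induction c with
  | zero =>
    intro d hc
    have : d.length = 0 := by
      rcases Nat.eq_zero_or_pos d.length with h | h
      · exact h
      · exfalso
        have : st ≤ d.length + st - 1 := by omega
        have := Nat.div_le_div_right (c := st) this
        rw [Nat.div_self hst] at this
        omega
    rw [List.length_eq_zero_iff.mp this, everyNth_nil]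
    simp
  | succ c ih =>
    intro d hc
    match d with
    | [] =>
      exfalso
      simp at hc
      have : (st - 1) / st = 0 := Nat.div_eq_of_lt (by omega)
      omega
    | a :: t =>
      rw [List.range_succ_eq_map, List.filterMap_cons]
      have h0 : (a :: t)[st * 0]? = some a := by simp
      rw [h0, List.filterMap_map]
      have hfun : ((fun k => (a :: t)[st * k]?) ∘ Nat.succ) =
          (fun k => (t.drop (st - 1))[st * k]?) := by
        funext k
        have h1 : st * Nat.succ k = (st - 1 + st * k) + 1 := by
          have := Nat.mul_succ st k
          omega
        simp only [Function.comp_apply, h1, List.getElem?_cons_succ, List.getElem?_drop]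
      rw [hfun]
      rw [ih (t.drop (st - 1)) ?_]
      · rw [everyNth_cons]
      · have hlen : (t.drop (st - 1)).length = (a :: t).length - st := by
          simp; omega
        rw [hlen]
        have := everyNth_div_step st (a :: t).length hst (by simp)
        omega

theorem slice?_stride {α : Type} (l : List α) (a st : Nat) (hst : 0 < st) :
    PySem.List.slice? l (some (a : Int)) none (st : Int) =
      some (everyNth st (l.drop a)) := by
  have hst0 : ¬ ((st : Int) = 0) := by omega
  have hstneg : ¬ ((st : Int) < 0) := by omega
  have haneg : ¬ ((a : Int) < 0) := by omega
  simp only [PySem.List.slice?, PySem.List.sliceIndices, hst0, hstneg, haneg,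
    if_false, if_neg, ite_false]
  by_cases h : a < l.length
  · have hmin : min (a : Int) (l.length : Int) = (a : Int) := by
      apply min_eq_left; omega
    have hlt : ((a : Int)) < (l.length : Int) := by omega
    have hpos : (0 : Int) < (st : Int) := by omega
    simp only [hmin, hlt, hpos, if_pos, ite_true]
    have hcount : (((l.length : Int) - (a : Int) + (st : Int) - 1) / (st : Int)).toNat
        = ((l.length - a) + st - 1) / st := by
      have hcast : ((l.length : Int) - (a : Int) + (st : Int) - 1)
          = (((l.length - a) + st - 1 : Nat) : Int) := by push_cast; omega
      rw [hcast, ← Int.natCast_ediv, Int.toNat_natCast]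
    rw [hcount]
    congr 1
    have hfun : (fun k : Nat => l[((a : Int) + (st : Int) * (k : Int)).toNat]?) =
        (fun k : Nat => (l.drop a)[st * k]?) := by
      funext k
      have hidx : ((a : Int) + (st : Int) * (k : Int)).toNat = a + st * k := by
        have : ((st : Int) * (k : Int)) = ((st * k : Nat) : Int) := by push_cast; ring
        omega
      rw [hidx, List.getElem?_drop]
    rw [hfun]
    exact filterMap_range_everyNth st hst _ _ (by simp)
  · have hmin : min (a : Int) (l.length : Int) = (l.length : Int) := by
      apply min_eq_right; omega
    have hlt : ¬ ((l.length : Int) < (l.length : Int)) := by omega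
    have hpos : (0 : Int) < (st : Int) := by omega
    simp only [hmin, hlt, hpos, if_pos, ite_false, if_neg]
    rw [List.drop_of_length_le (by omega), everyNth_nil]
    simp

theorem goA_spec (key : String) :
    ∀ (n : Nat) (l : List Char), l.length ≤ n → ∀ (cycle : Int) (s1 s2 s3 : List Char),
      goA_four_winds key l (4 * cycle) cycle s1 s2 s3 =
        (s2 ++ (if key = "Clockwise" then everyNth 4 (l.drop 1) else everyNth 4 (l.drop 3)))
        ++ (s1 ++ everyNth 2 l)
        ++ (s3 ++ (if key = "Clockwise" then everyNth 4 (l.drop 3) else everyNth 4 (l.drop 1))) := by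
  intro n
  induction n with
  | zero =>
    intro l hl cycle s1 s2 s3
    have : l = [] := List.length_eq_zero_iff.mp (by omega)
    subst this
    simp [goA_four_winds, everyNth_nil]
  | succ n ih =>
    intro l hl cycle s1 s2 s3
    have c1 : 4 * cycle + 1 - cycle * 4 = 1 := by ring
    have c2 : ¬ ((4 * cycle + 1) + 1 - cycle * 4 = 1) := by omega
    have c2' : (4 * cycle + 1) + 1 - cycle * 4 = 2 := by ring
    have c3 : ¬ ((4 * cycle + 1 + 1) + 1 - cycle * 4 = 1) := by omega
    have c3' : ¬ ((4 * cycle + 1 + 1) + 1 - cycle * 4 = 2) := by omega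
    have c3'' : (4 * cycle + 1 + 1) + 1 - cycle * 4 = 3 := by ring
    have c4 : ¬ ((4 * cycle + 1 + 1 + 1) + 1 - cycle * 4 = 1) := by omega
    have c4' : ¬ ((4 * cycle + 1 + 1 + 1) + 1 - cycle * 4 = 2) := by omega
    have c4'' : ¬ ((4 * cycle + 1 + 1 + 1) + 1 - cycle * 4 = 3) := by omega
    match l with
    | [] => simp [goA_four_winds, everyNth_nil]
    | [a] =>
      by_cases hk : key = "Clockwise" <;>
        simp [goA_four_winds, c1, c2, c2', c3, c3', c3'', c4, c4', c4'', hk, everyNth_cons, everyNth_nil]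
    | [a, b] =>
      by_cases hk : key = "Clockwise" <;>
        simp [goA_four_winds, c1, c2, c2', c3, c3', c3'', c4, c4', c4'', hk, everyNth_cons, everyNth_nil]
    | [a, b, c] =>
      by_cases hk : key = "Clockwise" <;>
        simp [goA_four_winds, c1, c2, c2', c3, c3', c3'', c4, c4', c4'', hk, everyNth_cons, everyNth_nil]
    | a :: b :: c :: d :: t =>
      have hstep : 4 * cycle + 1 + 1 + 1 + 1 = 4 * (cycle + 1) := by ring
      have ht : t.length ≤ n := by simp at hl; omega
      by_cases hk : key = "Clockwise"
      · subst hk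
        simp only [goA_four_winds, c1, c2, c2', c3, c3', c3'', c4, c4', c4'']
        norm_num
        rw [hstep, ih t ht (cycle + 1)]
        simp [everyNth_cons, everyNth_nil]
      · simp only [goA_four_winds, c1, c2, c2', c3, c3', c3'', c4, c4', c4'', hk]
        norm_num
        rw [hstep, ih t ht (cycle + 1)]
        simp [everyNth_cons, everyNth_nil, hk]

-- ===== VERDICT (by name: the statement is the Claim_ definition above) =====
theorem four_winds_en_spec : Claim_equal_four_winds_en := by
  intro plaintext key _
  unfold Spec_four_winds_en four_winds_en four_winds_en_alt
  generalize (PySem.Str.replace plaintext " " "").toList = s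
  have h0 : (PySem.List.slice? s (some 0) none 2).getD [] = everyNth 2 s := by
    have := slice?_stride s 0 2 (by omega)
    simp at this
    simp [this]
  have h1 : (PySem.List.slice? s (some 1) none 4).getD [] = everyNth 4 (List.drop 1 s) := by
    have := slice?_stride s 1 4 (by omega)
    simp at this
    simp [this]
  have h3 : (PySem.List.slice? s (some 3) none 4).getD [] = everyNth 4 (List.drop 3 s) := by
    have := slice?_stride s 3 4 (by omega)
    simp at this
    simp [this]
  have hgo : goA_four_winds key s 0 0 [] [] [] =
      ([] ++ (if key = "Clockwise" then everyNth 4 (s.drop 1) else everyNth 4 (s.drop 3)))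
      ++ ([] ++ everyNth 2 s)
      ++ ([] ++ (if key = "Clockwise" then everyNth 4 (s.drop 3) else everyNth 4 (s.drop 1))) := by
    have := goA_spec key s.length s (le_refl _) 0 [] [] []
    simpa using this
  rw [hgo]
  by_cases hk : key = "Clockwise" <;> simp [hk, h0, h1, h3, ← List.drop_one]
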